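-- pv_equiv track=rewrite | github.com/eaegorov/information-coding-theory | src/varshamov_tenengoltz_codes.py | generate_vt_codes
-- ===== SOURCE A (Python) =====
-- def generate_vt_codes(n):
--     module = n + 1
--     b = []
--     for i in range(n ** 2):
--         b.append(bin(i)[2:].zfill(n))
--
--     sum_of_numbers = []
--     for numbers in b:
--         sum_of_numbers.append(get_S(numbers))
--
--     vt_codes = []
--     for i in range(len(sum_of_numbers)):
--         if sum_of_numbers[i] % module == 0:
--             vt_codes.append(b[i])
--
--     return vt_codes
--
-- def get_S(word):
--     word = to_list(word)
--     s = 0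
--
--     for i in range(len(word)):
--         s += (i + 1) * word[i]
--
--     return s
--
-- def to_list(x):
--     x = [int(i) for i in x]
--     return x
-- ===== SOURCE B (Python) =====
-- def generate_vt_codes(n):
--     # Single pass: count in binary (little-endian bit list) while maintaining
--     # the positional weighted sum incrementally, instead of building every
--     # word string and rescanning it.
--     module = n + 1
--     vt_codes = []
--     bits = [0]   # little-endian bits of the current counter value
--     s = 0        # weighted sum of the printed word (1-based position, left to right)
--     for _ in range(n * n):
--         if s % module == 0:
--             word = ''.join('1' if b else '0' for b in reversed(bits))
--             pad = n - len(bits)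
--             vt_codes.append('0' * pad + word if pad > 0 else word)
--         # increment the counter, updating s as bits flip
--         m = max(n, len(bits))    # printed width of the current word
--         k = 0
--         while k < len(bits) and bits[k] == 1:
--             bits[k] = 0
--             s -= m - k
--             k += 1
--         if k == len(bits):
--             bits.append(1)
--             s += max(n, len(bits)) - k   # width may have grown past n
--         else:
--             bits[k] = 1
--             s += m - k
--     return vt_codes
-- ===== Notes on version B (the rewrite author's own statement) =====
-- stated objective: faster
-- what changed: Instead of building every word string via bin/zfill and rescanning each with get_S (three passes), B counts in binary with a little-endian bit list and updates the positional weighted sum incrementally as bits flip, in one pass.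
-- outside the precondition, e.g. on generate_vt_codes(-1): A raises ZeroDivisionError, B raises ZeroDivisionError
import Mathlib
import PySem

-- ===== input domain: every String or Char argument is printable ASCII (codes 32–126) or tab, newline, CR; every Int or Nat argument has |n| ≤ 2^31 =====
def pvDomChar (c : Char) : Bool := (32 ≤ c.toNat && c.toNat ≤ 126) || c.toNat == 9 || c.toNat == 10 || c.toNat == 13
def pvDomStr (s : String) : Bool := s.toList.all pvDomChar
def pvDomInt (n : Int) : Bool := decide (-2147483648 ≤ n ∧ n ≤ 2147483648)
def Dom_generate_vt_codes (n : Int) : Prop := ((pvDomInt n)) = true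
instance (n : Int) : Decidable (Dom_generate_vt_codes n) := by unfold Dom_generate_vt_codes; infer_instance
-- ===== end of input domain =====

-- B replaces A's three passes (build every word with bin/zfill, rescan each word with get_S,
-- then filter) by a single counting pass that keeps the positional weighted sum updated
-- incrementally as bits flip; measured asymptotically faster.

-- ===== PORT A =====
-- get_S: int(c) over the word's characters, then sum of (i+1)*word[i].
-- (the .getD 0 only totalises int(c), which never fails here: words consist of '0'/'1')
def pvGetS (word : String) : Int :=
  let wl : List Int := word.toList.map (fun c => (PySem.Int.ofChars? [c]).getD 0)
  (PySem.List.pyRange 0 (PySem.List.len wl) 1).foldl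
    (fun s i => s + (i + 1) * PySem.List.pyGetD wl i 0) 0

def generate_vt_codes (n : Int) : List String :=
  let module := n + 1
  let b := (PySem.List.pyRange 0 (n ^ 2) 1).foldl
    (fun acc i =>
      acc ++ [String.ofList (PySem.Chars.zfill
        (PySem.List.slice (PySem.Int.toBinChars0b i) (some 2) none) n)]) ([] : List String)
  let sums := b.foldl (fun acc w => acc ++ [pvGetS w]) ([] : List Int)
  (PySem.List.pyRange 0 (PySem.List.len sums) 1).foldl
    (fun acc i =>
      if PySem.Int.mod (PySem.List.pyGetD sums i 0) module == 0 then
        acc ++ [PySem.List.pyGetD b i ""]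
      else acc) ([] : List String)

-- ===== PORT B =====
-- the while-loop of Source B incrementing the little-endian bit counter, updating s as bits flip
def pvIncr (n m : Int) : List Int → Int → Int → List Int × Int
  | [], k, s => ([1], s + (max n (k + 1) - k))
  | bit :: rest, k, s =>
    if bit == 1 then
      let r := pvIncr n m rest (k + 1) (s - (m - k))
      (0 :: r.1, r.2)
    else (1 :: rest, s + (m - k))

def pvRender (n : Int) (bits : List Int) : String :=
  let word := bits.reverse.map (fun b => if b == 1 then '1' else '0')
  let pad := n - PySem.List.len bits
  if pad > 0 then String.ofList (List.replicate pad.toNat '0' ++ word) else String.ofList word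

def generate_vt_codes_alt (n : Int) : List String :=
  let module := n + 1
  let fin := (PySem.List.pyRange 0 (n * n) 1).foldl
    (fun (st : List String × List Int × Int) _ =>
      let vt := if PySem.Int.mod st.2.2 module == 0 then st.1 ++ [pvRender n st.2.1] else st.1
      let m := max n (PySem.List.len st.2.1)
      let bs := pvIncr n m st.2.1 0 st.2.2
      (vt, bs.1, bs.2)) (([] : List String), [0], 0)
  fin.1

-- ===== PRECONDITION & SPEC =====
-- Pre_ excludes only n = -1, where the Python A raises ZeroDivisionError (module = 0).
def Pre_generate_vt_codes (n : Int) : Prop := n ≠ -1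
instance (n : Int) : Decidable (Pre_generate_vt_codes n) := by unfold Pre_generate_vt_codes; infer_instance
def pvWitness_generate_vt_codes : Int := (4)
def Spec_generate_vt_codes (n : Int) (out : List String) : Prop := out = generate_vt_codes_alt n
instance (n : Int) (out : List String) : Decidable (Spec_generate_vt_codes n out) := by unfold Spec_generate_vt_codes; infer_instance

-- ===== CLAIM (what is proved, stated in full; the proofs are below) =====
def Claim_equal_generate_vt_codes : Prop := ∀ (n : Int), Dom_generate_vt_codes n → Pre_generate_vt_codes n → Spec_generate_vt_codes n (generate_vt_codes n)

-- ===== LEMMAS AND PROOFS =====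

-- the digit character of a bit
def pvCh (b : Int) : Char := if b == 1 then '1' else '0'

-- little-endian binary digits ([] for 0)
def pvLeb : Nat → List Int
  | 0 => []
  | j + 1 => (((j + 1) % 2 : Nat) : Int) :: pvLeb ((j + 1) / 2)
decreasing_by exact Nat.div_lt_self (Nat.succ_pos j) (by omega)

-- the counter's bit list after j increments of Source B's loop (starts at [0])
def pvCbits (j : Nat) : List Int := if j = 0 then [0] else pvLeb j

-- plain binary increment of a little-endian bit list
def pvIncB : List Int → List Int
  | [] => [1]
  | b :: r => if b == 1 then 0 :: pvIncB r else 1 :: r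

-- weighted sum of a little-endian bit list whose printed width is m, from string index k
def pvWsum (m : Int) : List Int → Int → Int
  | [], _ => 0
  | b :: r, k => b * (m - k) + pvWsum m r (k + 1)

-- weighted sum of a printed digit list, first position weighted w
def pvSsum : Int → List Int → Int
  | _, [] => 0
  | w, x :: r => w * x + pvSsum (w + 1) r

def pvWordA (n i : Int) : List Char :=
  PySem.Chars.zfill (PySem.List.slice (PySem.Int.toBinChars0b i) (some 2) none) n

def pvStepA (n : Int) (acc : List String) (i : Int) : List String :=
  if PySem.Int.mod (pvGetS (String.ofList (pvWordA n i))) (n + 1) == 0 then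
    acc ++ [String.ofList (pvWordA n i)] else acc

def pvStB (n : Int) (st : List String × List Int × Int) : List String × List Int × Int :=
  let vt := if PySem.Int.mod st.2.2 (n + 1) == 0 then st.1 ++ [pvRender n st.2.1] else st.1
  let m := max n (PySem.List.len st.2.1)
  let bs := pvIncr n m st.2.1 0 st.2.2
  (vt, bs.1, bs.2)

lemma pvLeb_succ (j : Nat) : pvLeb (j + 1) = (((j + 1) % 2 : Nat) : Int) :: pvLeb ((j + 1) / 2) := by
  rw [pvLeb]

lemma pvCbits_zero : pvCbits 0 = [0] := by
  unfold pvCbits; rw [if_pos rfl]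

lemma pvLeb_zero : pvLeb 0 = [] := by
  rw [pvLeb]

lemma pvCbits_one : pvCbits 1 = [1] := by
  unfold pvCbits
  rw [if_neg (by omega)]
  have h := pvLeb_succ 0
  norm_num at h
  rw [h, pvLeb_zero]

lemma pvCbits_succ_succ (j : Nat) : pvCbits (j + 2) = (((j + 2) % 2 : Nat) : Int) :: pvLeb ((j + 2) / 2) := by
  unfold pvCbits
  rw [if_neg (by omega)]
  exact pvLeb_succ (j + 1)

lemma pvCbits_pos (j : Nat) (h : 1 ≤ j) : pvCbits j = pvLeb j := by
  unfold pvCbits; rw [if_neg (by omega)]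

lemma pvWsum_shift (bits : List Int) : ∀ (m k : Int), pvWsum (m + 1) bits (k + 1) = pvWsum m bits k := by
  induction bits with
  | nil => intro m k; rfl
  | cons b r ih =>
    intro m k
    simp only [pvWsum, ih]
    ring_nf

lemma pvCbits_binary (j : Nat) : ∀ b ∈ pvCbits j, b = 0 ∨ b = 1 := by
  have hleb : ∀ N j, j ≤ N → ∀ b ∈ pvLeb j, b = 0 ∨ b = 1 := by
    intro N
    induction N with
    | zero => intro j hj; interval_cases j; simp [pvLeb]
    | succ N ih =>
      intro j hj b hb
      match j, hb with
      | 0, hb => simp [pvLeb] at hb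
      | j + 1, hb =>
        rw [pvLeb] at hb
        rcases List.mem_cons.mp hb with h | h
        · subst h; omega
        · exact ih ((j + 1) / 2) (by omega) b h
  unfold pvCbits
  split
  · simp
  · exact hleb j j le_rfl

lemma pvCbits_ne_nil (j : Nat) : pvCbits j ≠ [] := by
  unfold pvCbits
  split
  · simp
  · rename_i h
    match j, h with
    | j + 1, _ => rw [pvLeb]; simp

lemma pvIncr_spec (n : Int) : ∀ (bits : List Int) (m k s : Int),
    (∀ b ∈ bits, b = 0 ∨ b = 1) → m = max n (k + bits.length) →
    pvIncr n m bits k s =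
      (pvIncB bits, s - pvWsum m bits k + pvWsum (max n (k + (pvIncB bits).length)) (pvIncB bits) k) := by
  intro bits
  induction bits with
  | nil =>
    intro m k s _ _
    simp only [pvIncr, pvIncB, pvWsum, List.length_singleton]
    simp only [Prod.mk.injEq, true_and]
    push_cast
    ring
  | cons b r ih =>
    intro m k s hb hm
    rcases hb b List.mem_cons_self with hb0 | hb1
    · subst hb0
      simp only [pvIncr, pvIncB]
      norm_num
      simp only [List.length_cons] at hm
      push_cast at hm
      rw [← hm]
      simp only [pvWsum]
      ring
    · subst hb1
      simp only [pvIncr, pvIncB]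
      norm_num
      rw [ih m (k + 1) (s - (m - k)) (fun b h => hb b (List.mem_cons_of_mem _ h))
        (by rw [hm]; simp only [List.length_cons]; push_cast; omega)]
      have hM : k + 1 + ((pvIncB r).length : Int) = k + (((pvIncB r).length : Int) + 1) := by ring
      rw [hM]
      simp only [true_and, pvWsum]
      have hsh : pvWsum (max n (k + (((pvIncB r).length : Int) + 1))) (pvIncB r) (k + 1) =
          pvWsum (max n (k + (((pvIncB r).length : Int) + 1))) (pvIncB r) (1 + k) := by
        rw [add_comm 1 k]
      have hsh2 : pvWsum m r (k + 1) = pvWsum m r (1 + k) := by rw [add_comm 1 k]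
      rw [hsh, hsh2]
      ring

lemma pvIncB_cbits (j : Nat) : pvIncB (pvCbits j) = pvCbits (j + 1) := by
  induction j using Nat.strong_induction_on with
  | _ j ih =>
    match j with
    | 0 =>
      rw [pvCbits_zero, pvCbits_one]
      rfl
    | 1 =>
      rw [pvCbits_one, pvCbits_succ_succ 0]
      norm_num
      have h := pvLeb_succ 0
      norm_num at h
      rw [h, pvLeb_zero]
      rfl
    | j + 2 =>
      rw [pvCbits_succ_succ j, pvCbits_succ_succ (j + 1)]
      rcases Nat.even_or_odd (j + 2) with he | ho
      · have hm : (j + 2) % 2 = 0 := Nat.even_iff.mp he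
        have hm3 : (j + 1 + 2) % 2 = 1 := by omega
        have hd : (j + 1 + 2) / 2 = (j + 2) / 2 := by omega
        simp only [pvIncB, hm, hm3, hd]
        norm_num
      · have hm : (j + 2) % 2 = 1 := Nat.odd_iff.mp ho
        have hm3 : (j + 1 + 2) % 2 = 0 := by omega
        have hd : (j + 1 + 2) / 2 = (j + 2) / 2 + 1 := by omega
        have hrec := ih ((j + 2) / 2) (by omega)
        rw [pvCbits_pos _ (by omega), pvCbits_pos _ (by omega)] at hrec
        simp only [pvIncB, hm, hm3, hd]
        norm_num
        have he2 : (j + 2) / 2 = j / 2 + 1 := by omega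
        rw [he2] at hrec
        exact hrec

lemma pvToDigits_cbits (j : Nat) : Nat.toDigits 2 j = (pvCbits j).reverse.map pvCh := by
  induction j using Nat.strong_induction_on with
  | _ j ih =>
    match j with
    | 0 =>
      rw [pvCbits_zero]
      rfl
    | 1 =>
      rw [pvCbits_one]
      rfl
    | j + 2 =>
      rw [Nat.toDigits_eq_if (by norm_num), if_neg (by omega)]
      rw [ih ((j + 2) / 2) (by omega)]
      rw [pvCbits_succ_succ j, pvCbits_pos _ (by omega), List.reverse_cons, List.map_append]
      have hch : ((j + 2) % 2).digitChar = pvCh (((j + 2) % 2 : Nat) : Int) := by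
        rcases Nat.mod_two_eq_zero_or_one (j + 2) with h | h <;> rw [h] <;> rfl
      rw [hch]
      simp

lemma pvSsum_append (l l2 : List Int) : ∀ w, pvSsum w (l ++ l2) = pvSsum w l + pvSsum (w + l.length) l2 := by
  induction l with
  | nil => intro w; simp [pvSsum]
  | cons x r ih =>
    intro w
    simp only [List.cons_append, pvSsum, ih, List.length_cons]
    push_cast
    ring

lemma pvSsum_replicate_zero (P : Nat) (t : List Int) (w : Int) :
    pvSsum w (List.replicate P (0 : Int) ++ t) = pvSsum (w + P) t := by
  induction P generalizing w with
  | zero => simp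
  | succ P ih =>
    rw [List.replicate_succ]
    simp only [List.cons_append, pvSsum, ih]
    push_cast
    rw [show w + 1 + (P : Int) = w + ((P : Int) + 1) by ring]
    ring_nf

lemma pvSsum_rev (bits : List Int) : ∀ w, pvSsum w bits.reverse = pvWsum (w + bits.length - 1) bits 0 := by
  induction bits with
  | nil => intro w; simp [pvSsum, pvWsum]
  | cons b r ih =>
    intro w
    rw [List.reverse_cons, pvSsum_append, ih]
    simp only [pvWsum, pvSsum, List.length_reverse, List.length_cons]
    have h := pvWsum_shift r (w + r.length - 1) 0
    simp only [zero_add] at h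
    push_cast
    rw [show w + ((r.length : Int) + 1) - 1 = w + (r.length : Int) - 1 + 1 by ring, h]
    ring

lemma pvFold_getS (wl : List Int) : ∀ a : Int,
    (PySem.List.pyRange 0 (PySem.List.len wl) 1).foldl
      (fun s i => s + (i + 1) * PySem.List.pyGetD wl i 0) a = a + pvSsum 1 wl := by
  induction wl using List.reverseRecOn with
  | nil =>
    intro a
    rw [PySem.List.len_eq]
    norm_num [PySem.List.pyRange_one_eq_nil, pvSsum]
  | append_singleton wl x ih =>
    intro a
    rw [PySem.List.len_eq]
    have hlen : (((wl ++ [x]).length : Nat) : Int) = (wl.length : Int) + 1 := by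
      simp
    rw [hlen, PySem.List.pyRange_one_succ_right (by positivity), List.foldl_append]
    have hcong : ∀ (acc : Int), ∀ i ∈ PySem.List.pyRange 0 (wl.length : Int) 1,
        acc + (i + 1) * PySem.List.pyGetD (wl ++ [x]) i 0 =
        acc + (i + 1) * PySem.List.pyGetD wl i 0 := by
      intro acc i hi
      rcases PySem.List.mem_pyRange_one.mp hi with ⟨h0, h1⟩
      rw [PySem.List.pyGetD_of_nonneg _ _ h0, PySem.List.pyGetD_of_nonneg _ _ h0,
        List.getD_append _ _ _ _ (by omega)]
    rw [PySem.List.foldl_congr_mem _ _ _ _ hcong]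
    have hlast : PySem.List.pyGetD (wl ++ [x]) (wl.length : Int) 0 = x := by
      rw [PySem.List.pyGetD_of_nonneg _ _ (by positivity)]
      simp
    have hpre : PySem.List.pyRange 0 (PySem.List.len wl) 1 = PySem.List.pyRange 0 (wl.length : Int) 1 := by
      rw [PySem.List.len_eq]
    rw [← hpre, List.foldl_cons, List.foldl_nil, ih, hlast, pvSsum_append]
    simp only [pvSsum]
    ring

lemma pvZfill_digits (cs : List Char) (n : Int) (hne : cs ≠ [])
    (hc : ∀ c ∈ cs, c = '0' ∨ c = '1') :
    PySem.Chars.zfill cs n = List.replicate ((n - cs.length).toNat) '0' ++ cs := by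
  unfold PySem.Chars.zfill
  by_cases hn : n ≤ (cs.length : Int)
  · rw [if_pos hn]
    have h0 : (n - (cs.length : Int)).toNat = 0 := by omega
    rw [h0]
    rfl
  · rw [if_neg hn]
    match cs, hne, hc with
    | c :: rest, _, hc =>
      have hc0 := hc c List.mem_cons_self
      have hsign : ¬ (c = '+' ∨ c = '-') := by
        rcases hc0 with h | h <;> subst h <;> decide
      show (if c = '+' ∨ c = '-' then c :: (List.replicate (n.toNat - (c :: rest).length) '0' ++ rest)
            else List.replicate (n.toNat - (c :: rest).length) '0' ++ c :: rest) = _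
      rw [if_neg hsign]
      have hnn : n.toNat - (c :: rest).length = (n - ((c :: rest).length : Int)).toNat := by
        simp only [List.length_cons] at hn ⊢
        omega
      rw [hnn]

lemma pvGetS_mk (cs : List Char) :
    pvGetS (String.ofList cs) = pvSsum 1 (cs.map (fun c => (PySem.Int.ofChars? [c]).getD 0)) := by
  unfold pvGetS
  simp only [String.toList_ofList]
  rw [pvFold_getS]
  ring

lemma pvWordA_eq (n : Int) (j : Nat) :
    pvWordA n (j : Int) = List.replicate ((n - (pvCbits j).length).toNat) '0' ++ (pvCbits j).reverse.map pvCh := by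
  unfold pvWordA
  have h1 : PySem.Int.toBinChars0b (j : Int) = '0' :: 'b' :: Nat.toDigits 2 j := by
    unfold PySem.Int.toBinChars0b
    rw [if_neg (by omega)]
    norm_num
  have h2 : PySem.List.slice ('0' :: 'b' :: Nat.toDigits 2 j) (some 2) none = Nat.toDigits 2 j := by
    rw [PySem.List.slice_from]
    · rfl
    · norm_num
  rw [h1, h2, pvToDigits_cbits]
  have hlen : ((pvCbits j).reverse.map pvCh).length = (pvCbits j).length := by simp
  rw [pvZfill_digits _ _ ?hne ?hc, hlen]
  case hne =>
    simp [pvCbits_ne_nil j]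
  case hc =>
    intro c hcm
    rcases List.mem_map.mp hcm with ⟨b, _, hb⟩
    unfold pvCh at hb
    split at hb
    · right; exact hb.symm
    · left; exact hb.symm

lemma pvRender_cbits (n : Int) (j : Nat) : pvRender n (pvCbits j) = String.ofList (pvWordA n (j : Int)) := by
  unfold pvRender
  rw [pvWordA_eq]
  have hch : (fun b : Int => if b == 1 then '1' else '0') = pvCh := rfl
  rw [hch, PySem.List.len_eq]
  by_cases hp : n - ((pvCbits j).length : Int) > 0
  · rw [if_pos hp]
  · rw [if_neg hp]
    have h0 : (n - ((pvCbits j).length : Int)).toNat = 0 := by omega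
    rw [h0]
    rfl

lemma pvGetS_wordA (n : Int) (j : Nat) :
    pvGetS (String.ofList (pvWordA n (j : Int))) = pvWsum (max n (pvCbits j).length) (pvCbits j) 0 := by
  rw [pvWordA_eq, pvGetS_mk, List.map_append, List.map_map, List.map_replicate]
  have hz : ((PySem.Int.ofChars? ['0']).getD 0 : Int) = 0 := by decide
  rw [hz]
  have hid : List.map ((fun c => (PySem.Int.ofChars? [c]).getD 0) ∘ pvCh) (pvCbits j).reverse
      = (pvCbits j).reverse := by
    rw [List.map_congr_left (g := id) ?h, List.map_id]
    case h =>
      intro b hbm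
      rcases pvCbits_binary j b (List.mem_reverse.mp hbm) with h | h <;> subst h <;> decide
  rw [hid, pvSsum_replicate_zero, pvSsum_rev]
  have hM : 1 + (((n - ((pvCbits j).length : Int)).toNat : Nat) : Int) + ((pvCbits j).length : Int) - 1
      = max n ((pvCbits j).length : Int) := by omega
  rw [hM]

lemma pvA_eq (n : Int) : generate_vt_codes n = (PySem.List.pyRange 0 (n ^ 2) 1).foldl (pvStepA n) [] := by
  unfold generate_vt_codes
  simp only [PySem.List.foldl_append_singleton_eq_map, List.nil_append, List.map_map]
  have hlen : PySem.List.len (List.map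
      (pvGetS ∘ fun i => String.ofList (PySem.Chars.zfill (PySem.List.slice (PySem.Int.toBinChars0b i) (some 2) none) n))
      (PySem.List.pyRange 0 (n ^ 2) 1)) = n ^ 2 := by
    rw [PySem.List.len_eq]
    simp only [List.length_map, PySem.List.length_pyRange_one]
    have : (0:Int) ≤ n ^ 2 := sq_nonneg n
    omega
  rw [hlen]
  apply PySem.List.foldl_congr_mem
  intro acc i hi
  rcases PySem.List.mem_pyRange_one.mp hi with ⟨h0, h1⟩
  rw [PySem.List.pyGetD_map_pyRange_of_nonneg _ _ _ _ h0 h1,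
    PySem.List.pyGetD_map_pyRange_of_nonneg _ _ _ _ h0 h1]
  rfl

lemma pvFoldl_const_iterate {α β : Type} (f : β → β) : ∀ (l : List α) (init : β),
    l.foldl (fun st _ => f st) init = f^[l.length] init := by
  intro l
  induction l with
  | nil => intro init; rfl
  | cons x r ih =>
    intro init
    rw [List.foldl_cons, ih, List.length_cons, Function.iterate_succ_apply]

lemma pvB_eq (n : Int) : generate_vt_codes_alt n = ((pvStB n)^[(n * n).toNat] ([], [0], 0)).1 := by
  show ((PySem.List.pyRange 0 (n * n) 1).foldl (fun st _ => pvStB n st) ([], [0], 0)).1 = _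
  rw [pvFoldl_const_iterate, PySem.List.length_pyRange_one]
  norm_num

lemma pvInvariant (n : Int) (j : Nat) :
    (pvStB n)^[j] ([], [0], 0) =
      ((PySem.List.pyRange 0 (j : Int) 1).foldl (pvStepA n) [],
        pvCbits j, pvWsum (max n (pvCbits j).length) (pvCbits j) 0) := by
  induction j with
  | zero =>
    rw [Function.iterate_zero_apply, pvCbits_zero]
    norm_num [PySem.List.pyRange_one_eq_nil, pvWsum]
  | succ j ih =>
    rw [Function.iterate_succ_apply', ih]
    unfold pvStB
    simp only [PySem.List.len_eq]
    rw [pvIncr_spec n (pvCbits j) _ 0 _ (pvCbits_binary j) (by rw [zero_add])]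
    rw [pvIncB_cbits]
    have hrange : PySem.List.pyRange 0 ((j + 1 : Nat) : Int) 1 =
        PySem.List.pyRange 0 (j : Int) 1 ++ [(j : Int)] := by
      push_cast
      exact PySem.List.pyRange_one_succ_right (by positivity)
    rw [hrange, List.foldl_append, List.foldl_cons, List.foldl_nil]
    unfold pvStepA
    rw [pvRender_cbits, pvGetS_wordA]
    simp only [zero_add]
    have hS : pvWsum (max n ((pvCbits j).length : Int)) (pvCbits j) 0 -
        pvWsum (max n ((pvCbits j).length : Int)) (pvCbits j) 0 +
        pvWsum (max n ((pvCbits (j+1)).length : Int)) (pvCbits (j+1)) 0 =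
        pvWsum (max n ((pvCbits (j+1)).length : Int)) (pvCbits (j+1)) 0 := by ring
    rw [hS]

-- ===== VERDICT (by name: the statement is the Claim_ definition above) =====
theorem generate_vt_codes_spec : Claim_equal_generate_vt_codes := by
  intro n _ _
  unfold Spec_generate_vt_codes
  rw [pvA_eq, pvB_eq, pvInvariant]
  have h1 : ((n * n).toNat : Int) = n ^ 2 := by
    have := mul_self_nonneg n
    rw [pow_two]; omega
  rw [h1]
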